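-- pv_equiv track=rewrite | github.com/sam-caldwell/conways_physics | src/conways_physics/species.py | pair_index
-- ===== SOURCE A (Python) =====
-- LAND_START = ord("A")
--
-- def pair_index(letter: str) -> int:
--     """Return a pair index grouping letters into male/female pairs.
--
--     Landers (A..M): A/B->0, C/D->1, ..., M/N->6.
--     Flyers (N..Z):  N/O->100, P/Q->101, R/S->102, T/U->103, V/W->104, X/Y->105.
--     Z does not have a gender; return a distinct index (999) but pair reproduction excludes Z.
--     """
--     c = letter.upper()
--     if c == "Z":
--         return 999
--     if c < "N":  # A..M landers, simple adjacent pairs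
--         i = ord(c) - LAND_START
--         return i // 2
--     # Flyers use explicit adjacent pairs starting at N/O
--     flyer_pairs = [
--         ("N", "O"),
--         ("P", "Q"),
--         ("R", "S"),
--         ("T", "U"),
--         ("V", "W"),
--         ("X", "Y"),
--     ]
--     for idx, (a, b) in enumerate(flyer_pairs):
--         if c == a or c == b:
--             return 100 + idx
--     # Default fallback
--     return 1000
-- ===== SOURCE B (Python) =====
-- LAND_START = ord("A")
--
-- def pair_index(letter: str) -> int:
--     """Return a pair index grouping letters into male/female pairs.
--
--     Same as A, but the flyer pair table and loop are replaced by the same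
--     closed-form arithmetic the lander branch already uses.
--     """
--     c = letter.upper()
--     if c == "Z":
--         return 999
--     if c < "N":  # A..M landers, simple adjacent pairs
--         i = ord(c) - LAND_START
--         return i // 2
--     # Flyers N..Y: adjacent pairs, computed arithmetically
--     if len(c) == 1 and c <= "Y":
--         return 100 + (ord(c) - ord("N")) // 2
--     return 1000
-- ===== Notes on version B (the rewrite author's own statement) =====
-- stated objective: simpler
-- what changed: The flyer branch's explicit 6-entry pair table and enumerate loop are replaced by closed-form floor-division arithmetic on the character code (the same style the lander branch already uses), guarded by a single length-and-upper-bound check.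
import Mathlib
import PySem

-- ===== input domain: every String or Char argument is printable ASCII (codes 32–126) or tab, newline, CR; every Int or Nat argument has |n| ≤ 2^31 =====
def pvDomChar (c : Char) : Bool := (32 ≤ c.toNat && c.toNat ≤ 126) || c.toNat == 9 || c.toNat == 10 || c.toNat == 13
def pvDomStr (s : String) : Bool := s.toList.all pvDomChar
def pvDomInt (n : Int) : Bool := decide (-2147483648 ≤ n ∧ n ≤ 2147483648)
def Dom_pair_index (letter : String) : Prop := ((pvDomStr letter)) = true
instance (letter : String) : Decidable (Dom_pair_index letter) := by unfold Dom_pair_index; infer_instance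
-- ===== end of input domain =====

-- B replaces A's flyer pair table + enumerate loop by the closed-form arithmetic the lander branch already uses (objective: simpler).

-- ===== PORT A =====
def pvFlyerPairs : List (String × String) :=
  [("N", "O"), ("P", "Q"), ("R", "S"), ("T", "U"), ("V", "W"), ("X", "Y")]

-- 'for idx, (a, b) in enumerate(flyer_pairs): if c == a or c == b: return 100 + idx'
def pvFlyerLoop (c : String) : List (Int × (String × String)) → Int
  | [] => 1000
  | (idx, (a, b)) :: rest => if c = a ∨ c = b then 100 + idx else pvFlyerLoop c rest

def pair_index (letter : String) : Int :=
  let c := PySem.Str.upper letter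
  if c = "Z" then 999
  else if c < "N" then
    match c.toList with
    | [ch] => PySem.Int.floordiv ((ch.toNat : Int) - 65) 2
    | _ => 0   -- ord(c) raises TypeError here; excluded by Pre_pair_index
  else pvFlyerLoop c (PySem.List.enumerate pvFlyerPairs 0)

-- ===== PORT B =====
-- ord(s) for a single-character string (B only calls it with len(s) == 1; 0 is the TypeError case, outside Pre_pair_index)
def pvOrdB (s : String) : Int :=
  match s.toList with
  | [] => 0
  | ch :: [] => (ch.toNat : Int)
  | _ :: _ :: _ => 0

def pair_index_alt (letter : String) : Int :=
  let c := PySem.Str.upper letter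
  if c = "Z" then 999
  else if c < "N" then PySem.Int.floordiv (pvOrdB c - 65) 2
  else if PySem.Str.len c = 1 ∧ c ≤ "Y" then 100 + PySem.Int.floordiv (pvOrdB c - 78) 2
  else 1000

-- ===== PRECONDITION & SPEC =====
-- A (and B) raise TypeError in ord() exactly when the uppercased string sorts lexicographically below the first flyer letter (code point 78) and is not a single character.
def Pre_pair_index (letter : String) : Prop :=
  (PySem.Str.upper letter).toList < "N".toList → (PySem.Str.upper letter).toList.length = 1
instance (letter : String) : Decidable (Pre_pair_index letter) := by unfold Pre_pair_index; infer_instance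
def pvWitness_pair_index : String := "q"

def Spec_pair_index (letter : String) (out : Int) : Prop := out = pair_index_alt letter
instance (letter : String) (out : Int) : Decidable (Spec_pair_index letter out) := by unfold Spec_pair_index; infer_instance

-- ===== CLAIM (what is proved, stated in full; the proofs are below) =====
def Claim_equal_pair_index : Prop := ∀ (letter : String), Dom_pair_index letter → Pre_pair_index letter → Spec_pair_index letter (pair_index letter)

-- ===== LEMMAS AND PROOFS =====
theorem pvCharLt (a b : Char) : a < b ↔ a.toNat < b.toNat := by
  rw [Char.lt_def]; exact UInt32.lt_iff_toNat_lt

theorem pvCharEqOfToNat (a b : Char) (h : a.toNat = b.toNat) : a = b :=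
  Char.ext (UInt32.toNat_inj.mp h)

theorem pvSingletonLt (a b : Char) : [a] < [b] ↔ a < b := by
  rw [List.cons_lt_cons_iff]
  constructor
  · rintro (h | ⟨rfl, h⟩)
    · exact h
    · exact absurd h (lt_irrefl _)
  · exact Or.inl

theorem pvSingletonLe (a b : Char) : [a] ≤ [b] ↔ a ≤ b := by
  rw [← not_lt, ← not_lt, pvSingletonLt]

theorem pvOfListEq (a d : Char) : (String.ofList [a] = String.ofList [d]) ↔ a = d := by
  constructor
  · intro h
    have := congrArg String.toList h
    simpa using this
  · rintro rfl; rfl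

theorem pvLoop1000 (c : String) (h : ∀ d : Char, d.toNat ≤ 89 → c ≠ String.ofList [d]) :
    pvFlyerLoop c (PySem.List.enumerate pvFlyerPairs 0) = 1000 := by
  simp only [pvFlyerPairs, PySem.List.enumerate_cons, PySem.List.enumerate_nil, pvFlyerLoop]
  rw [if_neg, if_neg, if_neg, if_neg, if_neg, if_neg] <;>
    · rintro (h' | h')
      · exact h _ (by decide) h'
      · exact h _ (by decide) h'

theorem pair_index_spec : Claim_equal_pair_index := by
  intro letter _ hpre
  unfold Spec_pair_index pair_index pair_index_alt
  set c := PySem.Str.upper letter with hc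
  by_cases hz : c = "Z"
  · simp [hz]
  by_cases hn : c < "N"
  · -- lander branch: Pre_ gives a single character, both compute ord(c) - 65 // 2
    rcases hl : c.toList with _ | ⟨ch, tl⟩
    · have h1 := hpre ((String.lt_iff_toList_lt).1 hn)
      rw [hl] at h1
      simp at h1
    rcases tl with _ | ⟨ch2, tl2⟩
    · simp [hz, hn, pvOrdB, hl]
    · have := hpre ((String.lt_iff_toList_lt).1 hn)
      rw [hl] at this
      simp at this
  simp only [if_neg hz, if_neg hn]
  rcases hl : c.toList with _ | ⟨ch, tl⟩
  · -- c = "" would satisfy c < "N", contradicting hn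
    exact absurd ((String.lt_iff_toList_lt).2 (by rw [hl]; exact List.nil_lt_cons _ _)) hn
  rcases tl with _ | ⟨ch2, tl2⟩
  · -- single character
    have hceq : c = String.ofList [ch] := String.toList_inj.mp (by rw [hl]; simp)
    rw [hceq] at hz hn ⊢
    have h78 : 78 ≤ ch.toNat := by
      by_contra h
      exact hn ((String.lt_iff_toList_lt).2 (by
        simpa [pvSingletonLt, pvCharLt] using (by omega : ch.toNat < 78)))
    have hz' : ch.toNat ≠ 90 := fun h => hz (by
      rw [show ("Z" : String) = String.ofList ['Z'] from rfl, pvOfListEq]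
      exact pvCharEqOfToNat _ _ h)
    have hYv : 'Y'.toNat = 89 := rfl
    have hle : (String.ofList [ch] ≤ ("Y" : String)) ↔ ch.toNat ≤ 89 := by
      rw [String.le_iff_toList_le, show ("Y" : String).toList = ['Y'] from rfl,
        show (String.ofList [ch]).toList = [ch] from by simp, pvSingletonLe]
      constructor
      · intro h
        have := (not_lt.2 h)
        rw [pvCharLt] at this
        omega
      · intro h
        rw [← not_lt, pvCharLt]
        omega
    by_cases hy : ch.toNat ≤ 89
    · -- flyer letter: ch.toNat ∈ [78, 89], finitely many cases
      have hlen : PySem.Str.len (String.ofList [ch]) = 1 := by simp [PySem.Str.len]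
      rw [if_pos ⟨hlen, hle.2 hy⟩]
      rw [show pvOrdB (String.ofList [ch]) = (ch.toNat : Int) from by simp [pvOrdB]]
      have h12 : ch.toNat = 78 ∨ ch.toNat = 79 ∨ ch.toNat = 80 ∨ ch.toNat = 81 ∨
          ch.toNat = 82 ∨ ch.toNat = 83 ∨ ch.toNat = 84 ∨ ch.toNat = 85 ∨
          ch.toNat = 86 ∨ ch.toNat = 87 ∨ ch.toNat = 88 ∨ ch.toNat = 89 := by omega
      rcases h12 with h | h | h | h | h | h | h | h | h | h | h | h <;>
        first
        | (rw [pvCharEqOfToNat ch 'N' (by rw [h]; rfl)]; decide)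
        | (rw [pvCharEqOfToNat ch 'O' (by rw [h]; rfl)]; decide)
        | (rw [pvCharEqOfToNat ch 'P' (by rw [h]; rfl)]; decide)
        | (rw [pvCharEqOfToNat ch 'Q' (by rw [h]; rfl)]; decide)
        | (rw [pvCharEqOfToNat ch 'R' (by rw [h]; rfl)]; decide)
        | (rw [pvCharEqOfToNat ch 'S' (by rw [h]; rfl)]; decide)
        | (rw [pvCharEqOfToNat ch 'T' (by rw [h]; rfl)]; decide)
        | (rw [pvCharEqOfToNat ch 'U' (by rw [h]; rfl)]; decide)
        | (rw [pvCharEqOfToNat ch 'V' (by rw [h]; rfl)]; decide)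
        | (rw [pvCharEqOfToNat ch 'W' (by rw [h]; rfl)]; decide)
        | (rw [pvCharEqOfToNat ch 'X' (by rw [h]; rfl)]; decide)
        | (rw [pvCharEqOfToNat ch 'Y' (by rw [h]; rfl)]; decide)
    · -- above 'Y' (and not 'Z'): both return 1000
      rw [if_neg (by rw [hle]; exact fun ⟨_, h⟩ => hy h)]
      exact pvLoop1000 _ fun d hd h => by
        have := (pvOfListEq ch d).1 h
        subst this
        omega
  · -- length ≥ 2: the loop matches no pair letter and B's length test fails
    rw [if_neg (show ¬ (PySem.Str.len c = 1 ∧ c ≤ "Y") from by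
      simp [PySem.Str.len, hl]
      intro habs
      exact absurd habs (by omega))]
    exact pvLoop1000 _ fun d _ h => by
      have := congrArg String.toList h
      rw [hl] at this
      simp at this

-- ===== VERDICT (by name: the statement is the Claim_ definition above) =====
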